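-- pv_equiv track=rewrite | github.com/GplJakubP/Algorytmy_i_struktury_baz_danych_lab_2 | Dziel i rządź/zadanie4.py | oblicz_sume
-- ===== SOURCE A (Python) =====
-- def oblicz_sume(tablica, lewy_indeks, prawy_indeks):
--     if lewy_indeks == prawy_indeks:
--         return tablica[lewy_indeks]
--     else:
--         srodek = (lewy_indeks + prawy_indeks) // 2
--         lewa_suma = oblicz_sume(tablica, lewy_indeks, srodek)
--         prawa_suma = oblicz_sume(tablica, srodek + 1, prawy_indeks)
--         return lewa_suma + prawa_suma
-- ===== SOURCE B (Python) =====
-- def oblicz_sume(tablica, lewy_indeks, prawy_indeks):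
--     suma = 0
--     for i in range(lewy_indeks, prawy_indeks + 1):
--         suma += tablica[i]
--     return suma
-- ===== Notes on version B (the rewrite author's own statement) =====
-- stated objective: simpler
-- what changed: Replaces the divide-and-conquer recursion with a single iterative left-to-right accumulator loop over range(lewy_indeks, prawy_indeks+1).
import Mathlib
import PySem

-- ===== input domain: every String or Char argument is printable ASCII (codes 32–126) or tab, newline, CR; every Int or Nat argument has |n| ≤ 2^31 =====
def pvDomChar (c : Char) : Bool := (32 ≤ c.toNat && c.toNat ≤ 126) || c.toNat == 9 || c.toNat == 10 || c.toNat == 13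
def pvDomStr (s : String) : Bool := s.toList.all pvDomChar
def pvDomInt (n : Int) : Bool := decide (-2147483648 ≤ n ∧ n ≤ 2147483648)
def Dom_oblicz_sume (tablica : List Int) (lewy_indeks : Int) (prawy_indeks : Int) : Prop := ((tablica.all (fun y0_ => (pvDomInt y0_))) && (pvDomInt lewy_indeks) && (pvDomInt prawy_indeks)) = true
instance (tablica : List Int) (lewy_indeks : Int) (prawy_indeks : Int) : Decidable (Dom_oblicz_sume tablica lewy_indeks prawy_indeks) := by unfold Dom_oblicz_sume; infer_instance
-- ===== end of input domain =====

-- B replaces A's divide-and-conquer recursion by a single iterative accumulator pass (simpler, same O(n) work).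
-- Return-value equivalence only; neither version mutates its arguments.

-- ===== PORT A =====
-- Recursion on the segment width (prawy - lewy); the 'else 0' branch is a totality
-- guard for lewy > prawy, where Python A recurses forever (outside Pre_).
def oblicz_sume (tablica : List Int) (lewy_indeks : Int) (prawy_indeks : Int) : Int :=
  if lewy_indeks = prawy_indeks then
    (PySem.List.pyGet? tablica lewy_indeks).getD 0  -- tablica[lewy_indeks]; in range under Pre_
  else if lewy_indeks < prawy_indeks then
    let srodek := PySem.Int.floordiv (lewy_indeks + prawy_indeks) 2
    oblicz_sume tablica lewy_indeks srodek + oblicz_sume tablica (srodek + 1) prawy_indeks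
  else 0
termination_by (prawy_indeks - lewy_indeks).toNat
decreasing_by
  all_goals
    have h2 : (0:Int) < 2 := by omega
    rw [PySem.Int.floordiv_eq_ediv_of_pos h2]
    omega

-- ===== PORT B =====
def oblicz_sume_alt (tablica : List Int) (lewy_indeks : Int) (prawy_indeks : Int) : Int :=
  (PySem.List.pyRange lewy_indeks (prawy_indeks + 1) 1).foldl
    (fun suma i => suma + (PySem.List.pyGet? tablica i).getD 0) 0

-- ===== PRECONDITION & SPEC =====
-- Pre_ = exactly where Python A returns: a nonempty segment (lewy ≤ prawy; otherwise A's
-- recursion never terminates) whose two endpoints are valid Python indices (negative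
-- indices count from the end; otherwise IndexError).
def Pre_oblicz_sume (tablica : List Int) (lewy_indeks : Int) (prawy_indeks : Int) : Prop :=
  lewy_indeks ≤ prawy_indeks ∧
  PySem.Raise.InRange tablica.length lewy_indeks ∧
  PySem.Raise.InRange tablica.length prawy_indeks
instance (tablica : List Int) (lewy_indeks : Int) (prawy_indeks : Int) : Decidable (Pre_oblicz_sume tablica lewy_indeks prawy_indeks) := by unfold Pre_oblicz_sume; infer_instance

def pvWitness_oblicz_sume : List Int × Int × Int := ([1, -2, 3, 4], 0, 3)

def Spec_oblicz_sume (tablica : List Int) (lewy_indeks : Int) (prawy_indeks : Int) (out : Int) : Prop := out = oblicz_sume_alt tablica lewy_indeks prawy_indeks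
instance (tablica : List Int) (lewy_indeks : Int) (prawy_indeks : Int) (out : Int) : Decidable (Spec_oblicz_sume tablica lewy_indeks prawy_indeks out) := by unfold Spec_oblicz_sume; infer_instance

-- ===== CLAIM (what is proved, stated in full; the proofs are below) =====
def Claim_equal_oblicz_sume : Prop := ∀ (tablica : List Int) (lewy_indeks : Int) (prawy_indeks : Int), Dom_oblicz_sume tablica lewy_indeks prawy_indeks → Pre_oblicz_sume tablica lewy_indeks prawy_indeks → Spec_oblicz_sume tablica lewy_indeks prawy_indeks (oblicz_sume tablica lewy_indeks prawy_indeks)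

-- ===== LEMMAS AND PROOFS =====

-- B's fold, rewritten as a sum over the mapped range (lets segment sums split by append).
lemma alt_eq_sum (tablica : List Int) (l p : Int) :
    oblicz_sume_alt tablica l p
      = ((PySem.List.pyRange l (p + 1) 1).map
          (fun i => (PySem.List.pyGet? tablica i).getD 0)).sum := by
  unfold oblicz_sume_alt
  rw [PySem.List.foldl_add]
  simp

-- A computes the segment sum, for any l ≤ p (no range condition needed:
-- out-of-range gets default to 0 on both sides identically).
lemma a_eq_sum (tablica : List Int) :
    ∀ n (l p : Int), (p - l).toNat = n → l ≤ p →
    oblicz_sume tablica l p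
      = ((PySem.List.pyRange l (p + 1) 1).map
          (fun i => (PySem.List.pyGet? tablica i).getD 0)).sum := by
  intro n
  induction n using Nat.strong_induction_on with
  | _ n ih =>
    intro l p hn hlp
    rcases eq_or_lt_of_le hlp with heq | hlt
    · subst heq
      rw [oblicz_sume]
      simp [PySem.List.pyRange_one_singleton]
    · have hne : l ≠ p := ne_of_lt hlt
      rw [oblicz_sume]
      simp only [hne, if_false, hlt, if_true]
      have h2 : (0:Int) < 2 := by omega
      have hs : PySem.Int.floordiv (l + p) 2 = (l + p) / 2 :=
        PySem.Int.floordiv_eq_ediv_of_pos h2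
      rw [hs]
      have hsplit := PySem.List.pyRange_one_append l ((l + p) / 2 + 1) (p + 1)
        (by omega) (by omega)
      rw [hsplit, List.map_append, List.sum_append]
      rw [ih (((l + p) / 2 - l).toNat) (by omega) l ((l + p) / 2) rfl (by omega),
          ih ((p - ((l + p) / 2 + 1)).toNat) (by omega) ((l + p) / 2 + 1) p rfl (by omega)]

-- ===== VERDICT (by name: the statement is the Claim_ definition above) =====
theorem oblicz_sume_spec : Claim_equal_oblicz_sume := by
  intro tablica l p _ hpre
  unfold Spec_oblicz_sume
  rw [alt_eq_sum, a_eq_sum tablica ((p - l).toNat) l p rfl hpre.1]
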